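-- pv_equiv track=rewrite | github.com/won-N-only/algorithm_python | algorithm/3_algorithm_python/2.greedy/hard/1781.py | ramen_heap
-- ===== SOURCE A (Python) =====
-- import heapq
--
-- def ramen_heap(arr):
--     cnt = 0
--     baguni = []
--
--     for dL, cup in arr:
--         if len(baguni) < dL:
--             heapq.heappush(baguni, cup)
--             cnt += cup
--
--         elif baguni[0] < cup:
--             trash = heapq.heappop(baguni)
--             heapq.heappush(baguni, cup)
--             cnt += (cup-trash)
--     return cnt
-- ===== SOURCE B (Python) =====
-- def _insort(lst, x):
--     i = 0
--     while i < len(lst) and lst[i] <= x: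
--         i += 1
--     lst.insert(i, x)
--
-- def ramen_heap(arr):
--     kept = []  # ascending-sorted list of the cups kept so far
--     for dL, cup in arr:
--         if len(kept) < dL:
--             _insort(kept, cup)
--         elif kept[0] < cup:
--             kept.pop(0)
--             _insort(kept, cup)
--     return sum(kept)
-- ===== Notes on version B (the rewrite author's own statement) =====
-- stated objective: simpler
-- what changed: Replaces the binary min-heap (heapq sift-up/sift-down) by a plain ascending-sorted list maintained with linear insertion (insort) whose minimum is its head, and drops the running counter entirely: B just returns the sum of the kept cups at the end.
import Mathlib
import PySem

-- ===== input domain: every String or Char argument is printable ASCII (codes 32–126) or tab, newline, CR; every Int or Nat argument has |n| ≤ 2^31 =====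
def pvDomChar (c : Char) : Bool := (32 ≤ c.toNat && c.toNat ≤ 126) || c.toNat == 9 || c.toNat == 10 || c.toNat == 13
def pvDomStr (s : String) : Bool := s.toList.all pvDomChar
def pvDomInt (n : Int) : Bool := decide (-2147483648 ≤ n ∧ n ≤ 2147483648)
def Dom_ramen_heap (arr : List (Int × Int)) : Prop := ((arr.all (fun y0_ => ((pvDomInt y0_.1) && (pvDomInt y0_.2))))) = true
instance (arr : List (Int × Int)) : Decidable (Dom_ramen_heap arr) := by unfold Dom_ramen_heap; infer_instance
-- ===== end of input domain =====

-- B replaces A's binary min-heap by an ascending insertion-sorted list and returns the sum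
-- of the kept cups instead of maintaining a running counter (objective: simpler).

-- ===== PORT A =====
-- heapq._siftdown(heap, startpos, pos) with newitem = heap[pos]: move newitem toward the
-- root, shifting larger parents down; the final write heap[pos] = newitem is the `set`.
def pvSiftdown (heap : List Int) (startpos pos : Nat) (newitem : Int) : List Int :=
  if startpos < pos then
    if newitem < heap.getD ((pos - 1) / 2) 0 then
      pvSiftdown (heap.set pos (heap.getD ((pos - 1) / 2) 0)) startpos ((pos - 1) / 2) newitem
    else heap.set pos newitem
  else heap.set pos newitem
termination_by pos
decreasing_by omega

-- the while-loop of heapq._siftup: move the hole at pos down along the smaller child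
def pvSiftupLoop (heap : List Int) (pos childpos : Nat) : List Int × Nat :=
  if childpos < heap.length then
    if childpos + 1 < heap.length ∧ ¬ heap.getD childpos 0 < heap.getD (childpos + 1) 0 then
      pvSiftupLoop (heap.set pos (heap.getD (childpos + 1) 0)) (childpos + 1) (2 * (childpos + 1) + 1)
    else
      pvSiftupLoop (heap.set pos (heap.getD childpos 0)) childpos (2 * childpos + 1)
  else (heap, pos)
termination_by heap.length - childpos
decreasing_by all_goals simp only [List.length_set]; omega

-- heapq._siftup(heap, pos): newitem = heap[pos]; sink the hole to a leaf, then sift back up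
def pvSiftup (heap : List Int) (pos : Nat) : List Int :=
  let newitem := heap.getD pos 0
  let r := pvSiftupLoop heap pos (2 * pos + 1)
  pvSiftdown r.1 pos r.2 newitem

-- heapq.heappush: heap.append(item); _siftdown(heap, 0, len(heap)-1)
def pvHeappush (heap : List Int) (item : Int) : List Int :=
  pvSiftdown (heap ++ [item]) 0 heap.length item

-- heapq.heappop: lastelt = heap.pop(); if heap: return heap[0] after heap[0]=lastelt; _siftup
-- (A only calls it on a nonempty heap, so the getD defaults are never the result)
def pvHeappop (heap : List Int) : Int × List Int :=
  if heap.dropLast.isEmpty then (heap.getLast?.getD 0, heap.dropLast)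
  else (heap.dropLast.getD 0 0, pvSiftup (heap.dropLast.set 0 (heap.getLast?.getD 0)) 0)

-- the body of A's for-loop; state = (cnt, baguni)
def pvStepA (st : Int × List Int) (p : Int × Int) : Int × List Int :=
  if (st.2.length : Int) < p.1 then
    (st.1 + p.2, pvHeappush st.2 p.2)
  else
    match PySem.List.pyGet? st.2 0 with
    | none => st   -- Python raises IndexError here (excluded by Pre_)
    | some m =>
      if m < p.2 then
        let pr := pvHeappop st.2
        (st.1 + (p.2 - pr.1), pvHeappush pr.2 p.2)
      else st

def ramen_heap (arr : List (Int × Int)) : Int :=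
  (arr.foldl pvStepA (0, ([] : List Int))).1

-- ===== PORT B =====
-- Source B's _insort: insert x after all elements ≤ x (this linear scan is exactly insertBy)
def pvInsort (lst : List Int) (x : Int) : List Int :=
  PySem.List.insertBy (fun a b => decide (a < b)) x lst

-- the body of B's for-loop; state = kept (ascending-sorted)
def pvStepB (kept : List Int) (p : Int × Int) : List Int :=
  if (kept.length : Int) < p.1 then pvInsort kept p.2
  else
    match kept with
    | [] => kept   -- Python raises IndexError here (excluded by Pre_)
    | m :: t => if m < p.2 then pvInsort t p.2 else kept

def ramen_heap_alt (arr : List (Int × Int)) : Int :=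
  (arr.foldl pvStepB ([] : List Int)).sum

-- ===== PRECONDITION & SPEC =====
-- Pre_ excludes exactly the inputs on which Python A raises IndexError: a nonempty arr whose
-- first deadline is ≤ 0 reaches `baguni[0]` with `baguni` still empty (afterwards the basket
-- is never empty again, so no other input raises).
def Pre_ramen_heap (arr : List (Int × Int)) : Prop :=
  0 < (arr.headD (1, 0)).1
instance (arr : List (Int × Int)) : Decidable (Pre_ramen_heap arr) := by unfold Pre_ramen_heap; infer_instance
def pvWitness_ramen_heap : (List (Int × Int)) := [(1, 5), (2, 3), (1, 7)]

def Spec_ramen_heap (arr : List (Int × Int)) (out : Int) : Prop := out = ramen_heap_alt arr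
instance (arr : List (Int × Int)) (out : Int) : Decidable (Spec_ramen_heap arr out) := by unfold Spec_ramen_heap; infer_instance

-- ===== CLAIM (what is proved, stated in full; the proofs are below) =====
def Claim_equal_ramen_heap : Prop := ∀ (arr : List (Int × Int)), Dom_ramen_heap arr → Pre_ramen_heap arr → Spec_ramen_heap arr (ramen_heap arr)

-- ===== LEMMAS AND PROOFS =====

-- getD / set bookkeeping
theorem pvGdSetSelf {l : List Int} {i : Nat} (h : i < l.length) (a : Int) :
    (l.set i a).getD i 0 = a := by
  simp [List.getD_eq_getElem?_getD, List.getElem?_set_self h]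

theorem pvGdSetNe {l : List Int} {i j : Nat} (h : i ≠ j) (a : Int) :
    (l.set i a).getD j 0 = l.getD j 0 := by
  simp [List.getD_eq_getElem?_getD, List.getElem?_set_ne h]

theorem pvSetPerm : ∀ {l : List Int} {i : Nat}, i < l.length → ∀ (a : Int),
    (l.set i a).Perm (a :: l.eraseIdx i) := by
  intro l
  induction l with
  | nil => intro i h; simp at h
  | cons y t ih =>
    intro i h a
    cases i with
    | zero => simp
    | succ n =>
      simp only [List.set_cons_succ, List.eraseIdx_cons_succ]
      exact ((ih (by simpa using h) a).cons y).trans (List.Perm.swap a y _)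

theorem pvSelfPerm : ∀ {l : List Int} {i : Nat}, i < l.length →
    l.Perm (l.getD i 0 :: l.eraseIdx i) := by
  intro l
  induction l with
  | nil => intro i h; simp at h
  | cons y t ih =>
    intro i h
    cases i with
    | zero => simp
    | succ n =>
      simp only [List.getD_cons_succ, List.eraseIdx_cons_succ]
      exact ((ih (by simpa using h)).cons y).trans (List.Perm.swap _ y _)

theorem pvSetSetPerm : ∀ {l : List Int} {i j : Nat}, i ≠ j → i < l.length → j < l.length →
    ∀ (x : Int), ((l.set i (l.getD j 0)).set j x).Perm (l.set i x) := by
  intro l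
  induction l with
  | nil => intro i j _ h; simp at h
  | cons y t ih =>
    intro i j hij hi hj x
    match i, j with
    | 0, 0 => exact absurd rfl hij
    | 0, (n+1) =>
      simp only [List.set_cons_zero, List.set_cons_succ, List.getD_cons_succ]
      have hn : n < t.length := by simpa using hj
      exact ((pvSetPerm hn x).cons _).trans
        ((List.Perm.swap x _ _).trans ((pvSelfPerm hn).cons x).symm)
    | (m+1), 0 =>
      simp only [List.set_cons_zero, List.set_cons_succ, List.getD_cons_zero]
      have hm : m < t.length := by simpa using hi
      exact ((pvSetPerm hm y).cons x).trans
        ((List.Perm.swap y x _).trans ((pvSetPerm hm x).cons y).symm)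
    | (m+1), (n+1) =>
      simp only [List.set_cons_succ, List.getD_cons_succ]
      exact (ih (by omega) (by simpa using hi) (by simpa using hj) x).cons y

-- heap order property, expressed through the parent index (j-1)/2
def IsHeap (l : List Int) : Prop :=
  ∀ j : Nat, 0 < j → j < l.length → l.getD ((j - 1) / 2) 0 ≤ l.getD j 0

theorem pvRootLe {l : List Int} (hh : IsHeap l) : ∀ j, j < l.length → l.getD 0 0 ≤ l.getD j 0 := by
  intro j
  induction j using Nat.strong_induction_on with
  | _ j ih =>
    intro hj
    rcases Nat.eq_zero_or_pos j with h0 | h0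
    · subst h0; exact le_refl _
    · exact le_trans (ih ((j - 1) / 2) (by omega) (by omega)) (hh j h0 hj)

theorem pvSiftdownPerm : ∀ (pos : Nat) (l : List Int) (x : Int), pos < l.length →
    (pvSiftdown l 0 pos x).Perm (l.set pos x) := by
  intro pos
  induction pos using Nat.strong_induction_on with
  | _ pos ih =>
    intro l x hpos
    rw [pvSiftdown]
    by_cases h0 : 0 < pos
    · by_cases hlt : x < l.getD ((pos - 1) / 2) 0
      · rw [if_pos h0, if_pos hlt]
        have h1 := ih ((pos - 1) / 2) (by omega) (l.set pos (l.getD ((pos - 1) / 2) 0)) x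
          (by simp only [List.length_set]; omega)
        exact h1.trans (pvSetSetPerm (by omega) hpos (by omega) x)
      · rw [if_pos h0, if_neg hlt]
    · rw [if_neg h0]

theorem pvSiftdownIsHeap : ∀ (pos : Nat) (l : List Int) (x : Int), pos < l.length →
    (∀ j, 0 < j → j < l.length → j ≠ pos → (j - 1) / 2 ≠ pos → l.getD ((j - 1) / 2) 0 ≤ l.getD j 0) →
    (∀ j, 0 < j → j < l.length → (j - 1) / 2 = pos → x ≤ l.getD j 0) →
    (∀ j, 0 < j → j < l.length → (j - 1) / 2 = pos → 0 < pos → l.getD ((pos - 1) / 2) 0 ≤ l.getD j 0) →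
    IsHeap (pvSiftdown l 0 pos x) := by
  intro pos
  induction pos using Nat.strong_induction_on with
  | _ pos ih =>
    intro l x hpos h1 h2 h3
    rw [pvSiftdown]
    by_cases hp : 0 < pos
    · by_cases hlt : x < l.getD ((pos - 1) / 2) 0
      · rw [if_pos hp, if_pos hlt]
        apply ih ((pos - 1) / 2) (by omega) _ x (by simp only [List.length_set]; omega)
        · -- H1'
          intro j hj hjlen hjne hparne
          rw [List.length_set] at hjlen
          have hjpos : j ≠ pos := fun h => hparne (by rw [h])
          rw [pvGdSetNe (Ne.symm hjpos)]
          by_cases hcp : (j - 1) / 2 = pos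
          · rw [hcp, pvGdSetSelf hpos]
            exact h3 j hj hjlen hcp hp
          · rw [pvGdSetNe (Ne.symm hcp)]
            exact h1 j hj hjlen hjpos hcp
        · -- H2'
          intro j hj hjlen hcp
          rw [List.length_set] at hjlen
          by_cases hjp : j = pos
          · subst hjp; rw [pvGdSetSelf hpos]; exact le_of_lt hlt
          · rw [pvGdSetNe (Ne.symm hjp)]
            exact le_trans (le_of_lt hlt) (hcp ▸ h1 j hj hjlen hjp (by omega))
        · -- H3'
          intro j hj hjlen hcp hppos
          rw [List.length_set] at hjlen
          rw [pvGdSetNe (show pos ≠ ((pos - 1) / 2 - 1) / 2 by omega)]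
          have h1pp : l.getD (((pos - 1) / 2 - 1) / 2) 0 ≤ l.getD ((pos - 1) / 2) 0 :=
            h1 ((pos - 1) / 2) (by omega) (by omega) (by omega) (by omega)
          by_cases hjp : j = pos
          · subst hjp; rw [pvGdSetSelf hpos]; exact h1pp
          · rw [pvGdSetNe (Ne.symm hjp)]
            exact le_trans h1pp (hcp ▸ h1 j hj hjlen hjp (by omega))
      · rw [if_pos hp, if_neg hlt]
        intro j hj hjlen
        rw [List.length_set] at hjlen
        by_cases hjp : j = pos
        · subst hjp
          rw [pvGdSetSelf hpos, pvGdSetNe (show j ≠ (j - 1) / 2 by omega)]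
          exact not_lt.mp hlt
        · rw [pvGdSetNe (Ne.symm hjp)]
          by_cases hcp : (j - 1) / 2 = pos
          · rw [hcp, pvGdSetSelf hpos]; exact h2 j hj hjlen hcp
          · rw [pvGdSetNe (Ne.symm hcp)]
            exact h1 j hj hjlen hjp hcp
    · rw [if_neg hp]
      have hpos0 : pos = 0 := by omega
      subst hpos0
      intro j hj hjlen
      rw [List.length_set] at hjlen
      rw [pvGdSetNe (by omega : (0:Nat) ≠ j)]
      by_cases hpar : (j - 1) / 2 = 0
      · rw [hpar, pvGdSetSelf hpos]
        exact h2 j hj hjlen hpar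
      · rw [pvGdSetNe (by omega)]
        exact h1 j hj hjlen (by omega) hpar

theorem pvGdAppendLt : ∀ {l : List Int} {j : Nat} (x : Int), j < l.length →
    (l ++ [x]).getD j 0 = l.getD j 0 := by
  intro l
  induction l with
  | nil => intro j x h; simp at h
  | cons y t ih =>
    intro j x h
    cases j with
    | zero => rfl
    | succ n => simpa using ih x (by simpa using h)

theorem pvSetAppendLen : ∀ (l : List Int) (x a : Int), (l ++ [x]).set l.length a = l ++ [a] := by
  intro l
  induction l with
  | nil => intro x a; rfl
  | cons y t ih => intro x a; simpa using ih x a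

theorem pvSetGdSelf : ∀ {l : List Int} {i : Nat}, i < l.length → l.set i (l.getD i 0) = l := by
  intro l
  induction l with
  | nil => intro i h; simp at h
  | cons y t ih =>
    intro i h
    cases i with
    | zero => rfl
    | succ n =>
      simp only [List.set_cons_succ, List.getD_cons_succ]
      rw [ih (by simpa using h)]

theorem pvHeappushPerm (h : List Int) (x : Int) : (pvHeappush h x).Perm (x :: h) := by
  unfold pvHeappush
  have h1 := pvSiftdownPerm h.length (h ++ [x]) x (by simp)
  rw [pvSetAppendLen] at h1
  exact h1.trans (by simpa using (List.perm_middle (a := x) (l₁ := h) (l₂ := [])))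

theorem pvHeappushIsHeap {h : List Int} (hh : IsHeap h) (x : Int) : IsHeap (pvHeappush h x) := by
  unfold pvHeappush
  apply pvSiftdownIsHeap h.length (h ++ [x]) x (by simp)
  · intro j hj hjlen hjne hparne
    simp only [List.length_append, List.length_cons, List.length_nil] at hjlen
    have hjl : j < h.length := by omega
    rw [pvGdAppendLt x hjl, pvGdAppendLt x (by omega)]
    exact hh j hj hjl
  · intro j hj hjlen hcp
    simp only [List.length_append, List.length_cons, List.length_nil] at hjlen
    omega
  · intro j hj hjlen hcp _
    simp only [List.length_append, List.length_cons, List.length_nil] at hjlen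
    omega

def PvQ1 (l : List Int) (pos : Nat) : Prop :=
  ∀ j, 0 < j → j < l.length → j ≠ pos → (j - 1) / 2 ≠ pos → l.getD ((j - 1) / 2) 0 ≤ l.getD j 0
def PvQ2 (l : List Int) (pos : Nat) : Prop :=
  ∀ j, 0 < j → j < l.length → (j - 1) / 2 = pos → 0 < pos → l.getD ((pos - 1) / 2) 0 ≤ l.getD j 0

theorem pvSiftupLoopSpec : ∀ (n : Nat) (l : List Int) (pos cp : Nat), l.length - cp ≤ n →
    pos < l.length → pos < cp →
    (pvSiftupLoop l pos cp).1.length = l.length ∧ (pvSiftupLoop l pos cp).2 < l.length ∧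
    ∀ y, ((pvSiftupLoop l pos cp).1.set (pvSiftupLoop l pos cp).2 y).Perm (l.set pos y) := by
  intro n
  induction n with
  | zero =>
    intro l pos cp hn hpos hcp
    rw [pvSiftupLoop, if_neg (by omega)]
    exact ⟨rfl, hpos, fun y => List.Perm.refl _⟩
  | succ n ih =>
    intro l pos cp hn hpos hcp
    rw [pvSiftupLoop]
    by_cases hl : cp < l.length
    · rw [if_pos hl]
      by_cases hc : cp + 1 < l.length ∧ ¬ l.getD cp 0 < l.getD (cp + 1) 0
      · rw [if_pos hc]
        have hr := ih (l.set pos (l.getD (cp + 1) 0)) (cp + 1) (2 * (cp + 1) + 1)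
          (by simp only [List.length_set]; omega) (by simp only [List.length_set]; omega) (by omega)
        refine ⟨by rw [hr.1, List.length_set], by simpa only [List.length_set] using hr.2.1, fun y => ?_⟩
        exact (hr.2.2 y).trans (pvSetSetPerm (by omega) hpos hc.1 y)
      · rw [if_neg hc]
        have hr := ih (l.set pos (l.getD cp 0)) cp (2 * cp + 1)
          (by simp only [List.length_set]; omega) (by simp only [List.length_set]; omega) (by omega)
        refine ⟨by rw [hr.1, List.length_set], by simpa only [List.length_set] using hr.2.1, fun y => ?_⟩
        exact (hr.2.2 y).trans (pvSetSetPerm (by omega) hpos hl y)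
    · rw [if_neg hl]
      exact ⟨rfl, hpos, fun y => List.Perm.refl _⟩

-- one down-step of the sift-up loop preserves the hole invariant
theorem pvSiftupStepQ {l : List Int} {pos c : Nat} (hpos : pos < l.length) (hc : c < l.length)
    (hcpar : (c - 1) / 2 = pos) (hc0 : 0 < c)
    (hmin : ∀ s, s < l.length → (s - 1) / 2 = pos → 0 < s → l.getD c 0 ≤ l.getD s 0)
    (hQ1 : PvQ1 l pos) (hQ2 : PvQ2 l pos) :
    PvQ1 (l.set pos (l.getD c 0)) c ∧ PvQ2 (l.set pos (l.getD c 0)) c := by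
  have hcpos : pos < c := by omega
  constructor
  · intro j hj hjlen hjne hjparne
    rw [List.length_set] at hjlen
    by_cases hjp : j = pos
    · subst hjp
      rw [pvGdSetNe (show j ≠ (j - 1) / 2 by omega), pvGdSetSelf hpos]
      exact hQ2 c hc0 hc hcpar (by omega)
    · rw [pvGdSetNe (Ne.symm hjp)]
      by_cases hcp : (j - 1) / 2 = pos
      · rw [hcp, pvGdSetSelf hpos]
        exact hmin j hjlen hcp hj
      · rw [pvGdSetNe (Ne.symm hcp)]
        exact hQ1 j hj hjlen hjp hcp
  · intro j hj hjlen hpar _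
    rw [List.length_set] at hjlen
    have hjgt : c < j := by omega
    rw [hcpar, pvGdSetSelf hpos, pvGdSetNe (show pos ≠ j by omega)]
    have := hQ1 j hj hjlen (by omega) (by omega)
    rw [hpar] at this
    exact this

theorem pvSiftupLoopHeap : ∀ (n : Nat) (l : List Int) (pos cp : Nat), l.length - cp ≤ n →
    pos < l.length → cp = 2 * pos + 1 → PvQ1 l pos → PvQ2 l pos →
    l.length ≤ 2 * (pvSiftupLoop l pos cp).2 + 1 ∧ PvQ1 (pvSiftupLoop l pos cp).1 (pvSiftupLoop l pos cp).2 := by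
  intro n
  induction n with
  | zero =>
    intro l pos cp hn hpos hcp hQ1 hQ2
    rw [pvSiftupLoop, if_neg (by omega)]
    exact ⟨by omega, hQ1⟩
  | succ n ih =>
    intro l pos cp hn hpos hcp hQ1 hQ2
    rw [pvSiftupLoop]
    by_cases hl : cp < l.length
    · rw [if_pos hl]
      by_cases hc : cp + 1 < l.length ∧ ¬ l.getD cp 0 < l.getD (cp + 1) 0
      · rw [if_pos hc]
        have hmin : ∀ s, s < l.length → (s - 1) / 2 = pos → 0 < s → l.getD (cp + 1) 0 ≤ l.getD s 0 := by
          intro s hs hsp hs0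
          have : s = cp ∨ s = cp + 1 := by omega
          rcases this with h | h
          · subst h; exact le_of_not_gt hc.2
          · subst h; exact le_refl _
        obtain ⟨q1, q2⟩ := pvSiftupStepQ hpos hc.1 (by omega) (by omega) hmin hQ1 hQ2
        have hr := ih (l.set pos (l.getD (cp + 1) 0)) (cp + 1) (2 * (cp + 1) + 1)
          (by simp only [List.length_set]; omega) (by simp only [List.length_set]; omega)
          rfl q1 q2
        exact ⟨by simpa only [List.length_set] using hr.1, hr.2⟩
      · rw [if_neg hc]
        have hmin : ∀ s, s < l.length → (s - 1) / 2 = pos → 0 < s → l.getD cp 0 ≤ l.getD s 0 := by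
          intro s hs hsp hs0
          have : s = cp ∨ s = cp + 1 := by omega
          rcases this with h | h
          · subst h; exact le_refl _
          · subst h
            rcases not_and_or.mp hc with h1 | h1
            · omega
            · exact le_of_lt (not_not.mp h1)
        obtain ⟨q1, q2⟩ := pvSiftupStepQ hpos hl (by omega) (by omega) hmin hQ1 hQ2
        have hr := ih (l.set pos (l.getD cp 0)) cp (2 * cp + 1)
          (by simp only [List.length_set]; omega) (by simp only [List.length_set]; omega)
          rfl q1 q2
        exact ⟨by simpa only [List.length_set] using hr.1, hr.2⟩
    · rw [if_neg hl]
      exact ⟨by omega, hQ1⟩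

theorem pvSiftupSpec {l : List Int} (h0 : 0 < l.length)
    (hQ1 : ∀ j, 0 < j → j < l.length → (j - 1) / 2 ≠ 0 → l.getD ((j - 1) / 2) 0 ≤ l.getD j 0) :
    (pvSiftup l 0).Perm l ∧ IsHeap (pvSiftup l 0) := by
  have hQ1' : PvQ1 l 0 := fun j hj hjl _ hpar => hQ1 j hj hjl hpar
  have hQ2' : PvQ2 l 0 := by intro j _ _ _ hfalse; omega
  obtain ⟨hlen, hpos2, hperm⟩ :=
    pvSiftupLoopSpec (l.length - (2 * 0 + 1)) l 0 (2 * 0 + 1) (le_refl _) h0 (by omega)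
  obtain ⟨hleaf, hQ⟩ :=
    pvSiftupLoopHeap (l.length - (2 * 0 + 1)) l 0 (2 * 0 + 1) (le_refl _) h0 rfl hQ1' hQ2'
  rw [show pvSiftup l 0 =
      pvSiftdown (pvSiftupLoop l 0 (2 * 0 + 1)).1 0 (pvSiftupLoop l 0 (2 * 0 + 1)).2 (l.getD 0 0)
    from rfl]
  constructor
  · refine ((pvSiftdownPerm _ _ _ (by rw [hlen]; exact hpos2)).trans ?_)
    exact (hperm _).trans (by rw [pvSetGdSelf h0])
  · apply pvSiftdownIsHeap _ _ _ (by rw [hlen]; exact hpos2)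
    · exact fun j hj hjl hne hpar => hQ j hj hjl hne hpar
    · intro j hj hjl hpar; rw [hlen] at hjl; omega
    · intro j hj hjl hpar _; rw [hlen] at hjl; omega

theorem pvHeappopSpec {h : List Int} (hne : h ≠ []) (hh : IsHeap h) :
    (pvHeappop h).1 = h.getD 0 0 ∧ ((pvHeappop h).1 :: (pvHeappop h).2).Perm h ∧ IsHeap (pvHeappop h).2 := by
  obtain ⟨rest, last, hdec⟩ : ∃ rest last, h = rest ++ [last] :=
    ⟨h.dropLast, h.getLast hne, (List.dropLast_append_getLast hne).symm⟩
  subst hdec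
  cases rest with
  | nil =>
    refine ⟨rfl, List.Perm.refl _, ?_⟩
    intro j hj hjl
    simp [pvHeappop] at hjl
  | cons r0 rt =>
    have h1 : ((r0 :: rt) ++ [last]).getLast?.getD 0 = last := by
      rw [List.getLast?_concat]
      rfl
    have h2 : ((r0 :: rt) ++ [last]).dropLast = r0 :: rt := List.dropLast_concat ..
    have hpop : pvHeappop ((r0 :: rt) ++ [last]) = (r0, pvSiftup (last :: rt) 0) := by
      unfold pvHeappop
      rw [h2, h1, if_neg (by simp)]
      rfl
    rw [hpop]
    have hlen2 : ((r0 :: rt) ++ [last]).length = rt.length + 2 := by simp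
    have hgd : ∀ k, 0 < k → k < rt.length + 1 →
        (last :: rt).getD k 0 = ((r0 :: rt) ++ [last]).getD k 0 := by
      intro k hk hkl
      cases k with
      | zero => omega
      | succ m =>
        show rt.getD m 0 = (r0 :: (rt ++ [last])).getD (m + 1) 0
        rw [List.getD_cons_succ]
        exact (pvGdAppendLt last (by omega)).symm
    have hQ : ∀ j, 0 < j → j < (last :: rt).length → (j - 1) / 2 ≠ 0 →
        (last :: rt).getD ((j - 1) / 2) 0 ≤ (last :: rt).getD j 0 := by
      intro j hj hjl hpar
      simp only [List.length_cons] at hjl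
      rw [hgd j hj (by omega), hgd ((j - 1) / 2) (by omega) (by omega)]
      exact hh j hj (by rw [hlen2]; omega)
    obtain ⟨hperm, hheap⟩ := pvSiftupSpec (by simp) hQ
    refine ⟨rfl, ?_, hheap⟩
    refine (hperm.cons r0).trans ?_
    show (r0 :: last :: rt).Perm (r0 :: (rt ++ [last]))
    exact List.Perm.cons r0 (by simpa using (List.perm_middle (a := last) (l₁ := rt) (l₂ := [])).symm)

-- B-side: insort on a sorted list
theorem pvInsortEqSorted {s : List Int} (hs : s.Pairwise (· ≤ ·)) (x : Int) :
    pvInsort s x = PySem.List.sorted (s ++ [x]) (fun y => y) false := by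
  rw [PySem.List.sorted_eq_foldl_insertBy (s ++ [x]) (fun y => y), List.foldl_append,
    ← PySem.List.sorted_eq_foldl_insertBy s (fun y => y),
    PySem.List.sorted_eq_self_of_pairwise s (fun y => y) hs]
  rfl

theorem pvInsortPerm {s : List Int} (hs : s.Pairwise (· ≤ ·)) (x : Int) :
    (pvInsort s x).Perm (x :: s) := by
  rw [pvInsortEqSorted hs x]
  exact (PySem.List.sorted_perm _ _ _).trans
    (by simpa using (List.perm_middle (a := x) (l₁ := s) (l₂ := [])))

theorem pvInsortPairwise {s : List Int} (hs : s.Pairwise (· ≤ ·)) (x : Int) :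
    (pvInsort s x).Pairwise (· ≤ ·) := by
  rw [pvInsortEqSorted hs x]
  exact PySem.List.sorted_pairwise _ _

-- the coupling invariant between A's state and B's state
def pvInv (st : Int × List Int) (s : List Int) : Prop :=
  IsHeap st.2 ∧ st.2.Perm s ∧ s.Pairwise (· ≤ ·) ∧ st.1 = s.sum

theorem pvStepInv {st : Int × List Int} {s : List Int} (h : pvInv st s) (p : Int × Int) :
    pvInv (pvStepA st p) (pvStepB s p) := by
  obtain ⟨c, bg⟩ := st
  obtain ⟨hH, hP, hS, hC⟩ := h
  have hc' : c = s.sum := hC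
  have hlen : bg.length = s.length := hP.length_eq
  by_cases hcond : (bg.length : Int) < p.1
  · have hA : pvStepA (c, bg) p = (c + p.2, pvHeappush bg p.2) := by
      unfold pvStepA; rw [if_pos hcond]
    have hB : pvStepB s p = pvInsort s p.2 := by
      unfold pvStepB; rw [if_pos (by rw [← hlen]; exact hcond)]
    rw [hA, hB]
    have hsum := (pvInsortPerm hS p.2).sum_eq
    rw [List.sum_cons] at hsum
    refine ⟨pvHeappushIsHeap hH p.2, ?_, pvInsortPairwise hS p.2, ?_⟩
    · exact (pvHeappushPerm bg p.2).trans ((hP.cons p.2).trans (pvInsortPerm hS p.2).symm)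
    · show c + p.2 = (pvInsort s p.2).sum
      rw [hsum, hc']; ring
  · cases s with
    | nil =>
      have hbg : bg = [] := List.eq_nil_of_length_eq_zero (by simpa using hlen)
      subst hbg
      have hA : pvStepA (c, []) p = (c, []) := by
        have hget : PySem.List.pyGet? ([] : List Int) 0 = none := by decide
        unfold pvStepA
        rw [if_neg hcond]
        simp only [hget]
      have hB : pvStepB [] p = [] := by
        unfold pvStepB; rw [if_neg hcond]
      rw [hA, hB]
      exact ⟨hH, hP, hS, hC⟩
    | cons m t =>
      obtain ⟨b0, bt, hbg⟩ : ∃ b0 bt, bg = b0 :: bt := by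
        cases bg with
        | nil => simp at hlen
        | cons a b => exact ⟨a, b, rfl⟩
      subst hbg
      have hb0m : b0 = m := by
        have hmem : b0 ∈ m :: t := hP.mem_iff.mp (by simp)
        have hmle : m ≤ b0 := by
          rcases List.mem_cons.mp hmem with h1 | h1
          · omega
          · exact (List.pairwise_cons.mp hS).1 b0 h1
        have hb0le : b0 ≤ m := by
          have hmbg : m ∈ b0 :: bt := hP.mem_iff.mpr (by simp)
          obtain ⟨i, hi, hig⟩ := List.getElem_of_mem hmbg
          have h1 := pvRootLe hH i hi
          have h2 : (b0 :: bt).getD i 0 = m := by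
            rw [List.getD_eq_getElem?_getD, List.getElem?_eq_getElem hi, hig]
            rfl
          rw [h2] at h1
          exact h1
        omega
      have hA : pvStepA (c, b0 :: bt) p =
          if b0 < p.2 then
            (c + (p.2 - (pvHeappop (b0 :: bt)).1), pvHeappush (pvHeappop (b0 :: bt)).2 p.2)
          else (c, b0 :: bt) := by
        have hget : PySem.List.pyGet? ((c, b0 :: bt).2) 0 = some b0 := by
          simp
        unfold pvStepA; rw [if_neg hcond, hget]
      have hB : pvStepB (m :: t) p = if m < p.2 then pvInsort t p.2 else m :: t := by
        unfold pvStepB; rw [if_neg (by rw [← hlen]; exact hcond)]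
      rw [hA, hB]
      by_cases hlt2 : m < p.2
      · rw [if_pos (show b0 < p.2 by rw [hb0m]; exact hlt2), if_pos hlt2]
        have hpop := pvHeappopSpec (by simp : (b0 :: bt) ≠ []) hH
        have htr : (pvHeappop (b0 :: bt)).1 = m := by rw [hpop.1]; exact hb0m
        have hperm2 : (pvHeappop (b0 :: bt)).2.Perm t := by
          have h2 := hpop.2.1
          rw [htr] at h2
          exact (h2.trans hP).cons_inv
        have htS : t.Pairwise (· ≤ ·) := (List.pairwise_cons.mp hS).2
        have hsum := (pvInsortPerm htS p.2).sum_eq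
        rw [List.sum_cons] at hsum
        refine ⟨pvHeappushIsHeap hpop.2.2 p.2, ?_, pvInsortPairwise htS p.2, ?_⟩
        · exact (pvHeappushPerm _ p.2).trans ((hperm2.cons p.2).trans (pvInsortPerm htS p.2).symm)
        · show c + (p.2 - (pvHeappop (b0 :: bt)).1) = (pvInsort t p.2).sum
          rw [hsum, htr, hc', List.sum_cons]
          ring
      · rw [if_neg (show ¬ b0 < p.2 by rw [hb0m]; exact hlt2), if_neg hlt2]
        exact ⟨hH, hP, hS, hC⟩

theorem pvFoldInv : ∀ (arr : List (Int × Int)) (st : Int × List Int) (s : List Int),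
    pvInv st s → pvInv (arr.foldl pvStepA st) (arr.foldl pvStepB s) := by
  intro arr
  induction arr with
  | nil => intro st s h; exact h
  | cons p rest ih => intro st s h; exact ih _ _ (pvStepInv h p)

-- ===== VERDICT (by name: the statement is the Claim_ definition above) =====
theorem ramen_heap_spec : Claim_equal_ramen_heap := by
  intro arr _ _
  unfold Spec_ramen_heap ramen_heap ramen_heap_alt
  have h := pvFoldInv arr (0, ([] : List Int)) ([] : List Int)
    ⟨by intro j hj hl; simp at hl, List.Perm.refl _, List.Pairwise.nil, rfl⟩
  exact h.2.2.2
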